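-- pv_equiv track=rewrite | github.com/DanielTromp/Atlas | src/infrastructure_atlas/infrastructure/external/commvault_client.py | _parse_plan_summary_text
-- ===== SOURCE A (Python) =====
-- from typing import Any
--
-- def _parse_plan_summary_text(value: Any) -> dict[str, str]:
--     if not isinstance(value, str):
--         return {}
--     result: dict[str, str] = {}
--     for segment in value.split(","):
--         if ":" not in segment:
--             continue
--         key, raw_val = segment.split(":", 1)
--         key = key.strip()
--         val = raw_val.strip()
--         if key:
--             result[key] = val
--     return result
-- ===== SOURCE B (Python) =====
-- def _parse_plan_summary_text(value):
--     if not isinstance(value, str):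
--         return {}
--     result = {}
--     key_buf = []
--     val_buf = []
--     seen_colon = False
--     for ch in value + ",":
--         if ch == ",":
--             if seen_colon:
--                 key = "".join(key_buf).strip()
--                 if key:
--                     result[key] = "".join(val_buf).strip()
--             key_buf = []
--             val_buf = []
--             seen_colon = False
--         elif ch == ":" and not seen_colon:
--             seen_colon = True
--         elif seen_colon:
--             val_buf.append(ch)
--         else:
--             key_buf.append(ch)
--     return result
-- ===== Notes on version B (the rewrite author's own statement) =====
-- stated objective: alternative
-- what changed: Replaces the split-by-comma then split-colon-maxsplit-1 segment loop with a single character-level state machine (key buffer, value buffer, seen-colon flag) that flushes an entry whenever a separator — including one sentinel separator appended at the end — is reached.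
import Mathlib
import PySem

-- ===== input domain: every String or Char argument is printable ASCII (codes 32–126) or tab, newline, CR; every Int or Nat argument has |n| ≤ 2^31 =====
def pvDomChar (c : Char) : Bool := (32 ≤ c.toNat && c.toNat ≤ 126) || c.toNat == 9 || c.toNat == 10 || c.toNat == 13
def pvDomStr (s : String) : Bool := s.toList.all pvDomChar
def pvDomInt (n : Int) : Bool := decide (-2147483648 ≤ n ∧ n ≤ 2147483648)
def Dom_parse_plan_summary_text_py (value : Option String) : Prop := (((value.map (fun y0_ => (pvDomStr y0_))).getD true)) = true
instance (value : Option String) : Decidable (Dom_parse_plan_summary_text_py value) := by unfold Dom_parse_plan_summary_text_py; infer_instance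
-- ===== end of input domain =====

-- B replaces A's split(',')/split(':',1) segment loop by a one-pass character state machine; same cost, no intermediate segment lists (return-value equivalence; neither mutates its argument).

-- ===== PORT A =====
-- loop body of A: process one comma-separated segment into the result dict
def pvAStep (result : PySem.Dict String String) (segment : String) : PySem.Dict String String :=
  if PySem.Str.isIn ":" segment = false then result
  else
    -- ':' is in segment, so segment.split(":", 1) yields exactly two pieces
    match (PySem.Str.splitMax? segment ":" 1).getD [] with
    | k :: raw_val :: _ =>
        let key := PySem.Str.strip k
        let val := PySem.Str.strip raw_val
        if key ≠ "" then result.insert key val else result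
    | _ => result

def parse_plan_summary_text_py (value : Option String) : List (String × String) :=
  match value with
  | none => []          -- not isinstance(value, str)
  | some s =>
      (((PySem.Str.split? s ",").getD []).foldl pvAStep PySem.Dict.empty).items

-- ===== PORT B =====
-- loop body of B: one character of the state machine (result, key_buf, val_buf, seen_colon)
def pvBStep (st : PySem.Dict String String × List Char × List Char × Bool) (ch : Char) :
    PySem.Dict String String × List Char × List Char × Bool :=
  let (result, key_buf, val_buf, seen_colon) := st
  if ch = ',' then
    let result :=
      if seen_colon then
        let key := PySem.Str.strip (String.ofList key_buf)
        if key ≠ "" then result.insert key (PySem.Str.strip (String.ofList val_buf)) else result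
      else result
    (result, [], [], false)
  else if ch = ':' ∧ ¬ seen_colon then (result, key_buf, val_buf, true)
  else if seen_colon then (result, key_buf, val_buf ++ [ch], seen_colon)
  else (result, key_buf ++ [ch], val_buf, seen_colon)

def parse_plan_summary_text_py_alt (value : Option String) : List (String × String) :=
  match value with
  | none => []
  | some s =>
      ((s.toList ++ [',']).foldl pvBStep (PySem.Dict.empty, [], [], false)).1.items

-- ===== PRECONDITION & SPEC =====
def Spec_parse_plan_summary_text_py (value : Option String) (out : List (String × String)) : Prop := out = parse_plan_summary_text_py_alt value
instance (value : Option String) (out : List (String × String)) : Decidable (Spec_parse_plan_summary_text_py value out) := by unfold Spec_parse_plan_summary_text_py; infer_instance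

-- ===== CLAIM (what is proved, stated in full; the proofs are below) =====
def Claim_equal_parse_plan_summary_text_py : Prop := ∀ (value : Option String), Dom_parse_plan_summary_text_py value → Spec_parse_plan_summary_text_py value (parse_plan_summary_text_py value)

-- ===== LEMMAS AND PROOFS =====

-- reference form of split(',') : accumulate the current segment in `pre`
def pvSp1 (pre : List Char) : List Char → List (List Char)
  | [] => [pre]
  | c :: rest => if c = ',' then pre :: pvSp1 [] rest else pvSp1 (pre ++ [c]) rest

-- reference form of split(':', 1)
def pvSpm (pre : List Char) : List Char → List (List Char)
  | [] => [pre]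
  | c :: rest => if c = ':' then [pre, rest] else pvSpm (pre ++ [c]) rest

-- the non-comma transitions of B's machine, on buffers only
def pvBufStep (b : List Char × List Char × Bool) (c : Char) : List Char × List Char × Bool :=
  if c = ':' ∧ ¬ b.2.2 then (b.1, b.2.1, true)
  else if b.2.2 then (b.1, b.2.1 ++ [c], b.2.2)
  else (b.1 ++ [c], b.2.1, b.2.2)

theorem pvSplitOn_go_char (l : List Char) : ∀ (fuel : Nat) (cur : List Char) (acc : List (List Char)),
    l.length < fuel →
    PySem.Chars.splitOn.go [','] fuel l cur acc = acc.reverse ++ pvSp1 cur.reverse l := by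
  induction l with
  | nil =>
      intro fuel cur acc h
      match fuel, h with
      | fuel + 1, _ => simp [PySem.Chars.splitOn.go, pvSp1]
  | cons c rest ih =>
      intro fuel cur acc h
      match fuel, h with
      | fuel + 1, h =>
        by_cases hc : c = ','
        · subst hc
          have hp : List.isPrefixOf [','] (',' :: rest) = true := by
            simp [List.isPrefixOf]
          rw [PySem.Chars.splitOn.go, if_pos hp,
            show List.drop [','].length (',' :: rest) = rest from rfl]
          simp only [List.length_cons] at h
          rw [ih fuel [] (cur.reverse :: acc) (by omega)]
          simp [pvSp1]
        · have hp : List.isPrefixOf [','] (c :: rest) = false := by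
            simp [List.isPrefixOf]
            exact fun h => hc h.symm
          rw [PySem.Chars.splitOn.go, if_neg (by simp [hp])]
          simp only [List.length_cons] at h
          rw [ih fuel (c :: cur) acc (by omega)]
          simp [pvSp1, hc]

theorem pvSplitOn_char (cs : List Char) : PySem.Chars.splitOn cs [','] = pvSp1 [] cs := by
  unfold PySem.Chars.splitOn
  rw [pvSplitOn_go_char cs (cs.length + 1) [] [] (by omega)]
  simp

theorem pvSplitOnMax_go_zero : ∀ (fuel : Nat) (l cur : List Char) (acc : List (List Char)),
    PySem.Chars.splitOnMax.go [':'] fuel 0 l cur acc = acc.reverse ++ [cur.reverse ++ l] := by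
  intro fuel l cur acc
  match fuel, l with
  | 0, l => simp [PySem.Chars.splitOnMax.go]
  | fuel + 1, [] => simp [PySem.Chars.splitOnMax.go]
  | fuel + 1, c :: rest => simp [PySem.Chars.splitOnMax.go]

theorem pvSplitOnMax_go_char (l : List Char) : ∀ (fuel : Nat) (cur : List Char) (acc : List (List Char)),
    l.length < fuel →
    PySem.Chars.splitOnMax.go [':'] fuel 1 l cur acc = acc.reverse ++ pvSpm cur.reverse l := by
  induction l with
  | nil =>
      intro fuel cur acc h
      match fuel, h with
      | fuel + 1, _ => simp [PySem.Chars.splitOnMax.go, pvSpm]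
  | cons c rest ih =>
      intro fuel cur acc h
      match fuel, h with
      | fuel + 1, h =>
        by_cases hc : c = ':'
        · subst hc
          have hp : List.isPrefixOf [':'] (':' :: rest) = true := by
            simp [List.isPrefixOf]
          rw [PySem.Chars.splitOnMax.go, if_neg (by omega : ¬ (1 : Nat) = 0), if_pos hp,
            show List.drop [':'].length (':' :: rest) = rest from rfl,
            show (1 : Nat) - 1 = 0 from rfl, pvSplitOnMax_go_zero]
          simp [pvSpm]
        · have hp : List.isPrefixOf [':'] (c :: rest) = false := by
            simp [List.isPrefixOf]
            exact fun h => hc h.symm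
          rw [PySem.Chars.splitOnMax.go, if_neg (by omega : ¬ (1 : Nat) = 0),
            if_neg (by simp [hp])]
          simp only [List.length_cons] at h
          rw [ih fuel (c :: cur) acc (by omega)]
          simp [pvSpm, hc]

theorem pvSplitOnMax_char (cs : List Char) : PySem.Chars.splitOnMax cs [':'] 1 = pvSpm [] cs := by
  unfold PySem.Chars.splitOnMax
  rw [if_neg (by omega), show (1 : Int).toNat = 1 from rfl]
  rw [pvSplitOnMax_go_char cs (cs.length + 1) [] [] (by omega)]
  simp

theorem pvSpm_colon (a : List Char) : ∀ (pre b : List Char), ':' ∉ a →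
    pvSpm pre (a ++ ':' :: b) = [pre ++ a, b] := by
  induction a with
  | nil => intro pre b _; simp [pvSpm]
  | cons c rest ih =>
      intro pre b h
      have hc : c ≠ ':' := fun hh => h (by simp [hh])
      rw [List.cons_append, pvSpm, if_neg hc, ih _ _ (fun hh => h (by simp [hh]))]
      simp

theorem pvIsIn_colon (seg : List Char) : PySem.Chars.isIn [':'] seg = true ↔ ':' ∈ seg := by
  rw [PySem.Chars.isIn_iff_infix]
  constructor
  · intro h; exact h.mem (by simp)
  · intro h
    rcases List.mem_iff_append.mp h with ⟨s, t, rfl⟩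
    exact ⟨s, t, by simp⟩

-- A's step, transported to char lists
def pvAStepC (d : PySem.Dict String String) (seg : List Char) : PySem.Dict String String :=
  pvAStep d (String.ofList seg)

theorem pvAStepC_no_colon (d : PySem.Dict String String) (seg : List Char) (h : ':' ∉ seg) :
    pvAStepC d seg = d := by
  have hfalse : PySem.Str.isIn ":" (String.ofList seg) = false := by
    unfold PySem.Str.isIn
    rw [show (":".toList) = [':'] by decide, String.toList_ofList]
    cases hb : PySem.Chars.isIn [':'] seg
    · rfl
    · exact absurd ((pvIsIn_colon seg).mp hb) h
  unfold pvAStepC pvAStep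
  rw [if_pos hfalse]

theorem pvAStepC_colon (d : PySem.Dict String String) (a b : List Char) (h : ':' ∉ a) :
    pvAStepC d (a ++ ':' :: b) =
      (if PySem.Str.strip (String.ofList a) ≠ "" then
        d.insert (PySem.Str.strip (String.ofList a)) (PySem.Str.strip (String.ofList b)) else d) := by
  unfold pvAStepC pvAStep
  have hin : PySem.Str.isIn ":" (String.ofList (a ++ ':' :: b)) = true := by
    unfold PySem.Str.isIn
    rw [show (":".toList) = [':'] by decide, String.toList_ofList]
    exact (pvIsIn_colon _).mpr (by simp)
  rw [if_neg (fun hf => by rw [hf] at hin; exact Bool.noConfusion hin)]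
  have hsp : (PySem.Str.splitMax? (String.ofList (a ++ ':' :: b)) ":" 1).getD []
      = [String.ofList a, String.ofList b] := by
    unfold PySem.Str.splitMax? PySem.Chars.splitMax?
    rw [if_neg (by decide)]
    rw [show (":".toList) = [':'] by decide]
    simp only [String.toList_ofList]
    rw [pvSplitOnMax_char, pvSpm_colon a [] b h]
    rfl
  rw [hsp]

-- B's buffer run over a colon-free prefix / after the colon
theorem pvBuf_true (seg : List Char) : ∀ kb vb,
    seg.foldl pvBufStep (kb, vb, true) = (kb, vb ++ seg, true) := by
  induction seg with
  | nil => intro kb vb; simp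
  | cons c rest ih =>
      intro kb vb
      rw [List.foldl_cons]
      rw [show pvBufStep (kb, vb, true) c = (kb, vb ++ [c], true) by simp [pvBufStep]]
      rw [ih]; simp

theorem pvBuf_no_colon (seg : List Char) : ∀ kb, ':' ∉ seg →
    seg.foldl pvBufStep (kb, [], false) = (kb ++ seg, [], false) := by
  induction seg with
  | nil => intro kb _; simp
  | cons c rest ih =>
      intro kb h
      have hc : c ≠ ':' := fun hh => h (by simp [hh])
      rw [List.foldl_cons]
      rw [show pvBufStep (kb, [], false) c = (kb ++ [c], [], false) by simp [pvBufStep, hc]]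
      rw [ih _ (fun hh => h (by simp [hh]))]
      simp

theorem pvBuf_colon (a : List Char) : ∀ (kb b : List Char), ':' ∉ a →
    (a ++ ':' :: b).foldl pvBufStep (kb, [], false) = (kb ++ a, b, true) := by
  induction a with
  | nil =>
      intro kb b _
      rw [List.nil_append, List.foldl_cons]
      rw [show pvBufStep (kb, [], false) ':' = (kb, [], true) by simp [pvBufStep]]
      rw [pvBuf_true]; simp
  | cons c rest ih =>
      intro kb b h
      have hc : c ≠ ':' := fun hh => h (by simp [hh])
      rw [List.cons_append, List.foldl_cons]
      rw [show pvBufStep (kb, [], false) c = (kb ++ [c], [], false) by simp [pvBufStep, hc]]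
      rw [ih _ _ (fun hh => h (by simp [hh]))]
      simp

theorem pvFirst_colon_decomp (l : List Char) : ':' ∈ l → ∃ a b, l = a ++ ':' :: b ∧ ':' ∉ a := by
  induction l with
  | nil => intro h; cases h
  | cons c rest ih =>
      intro h
      by_cases hc : c = ':'
      · exact ⟨[], rest, by simp [hc], by simp⟩
      · have hr : ':' ∈ rest := by
          rcases List.mem_cons.mp h with h' | h'
          · exact absurd h'.symm hc
          · exact h'
        rcases ih hr with ⟨a, b, rfl, ha⟩
        refine ⟨c :: a, b, by simp, ?_⟩
        intro hm
        rcases List.mem_cons.mp hm with h' | h'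
        · exact hc h'.symm
        · exact ha h'

-- flushing B's state after reading segment `pre` is A's step on `pre`
theorem pvFlush_eq_stepA (pre : List Char) (d : PySem.Dict String String) :
    pvBStep (d, pre.foldl pvBufStep ([], [], false)) ',' = (pvAStepC d pre, [], [], false) := by
  by_cases h : ':' ∈ pre
  · rcases pvFirst_colon_decomp pre h with ⟨a, b, rfl, ha⟩
    rw [pvBuf_colon a [] b ha, pvAStepC_colon d a b ha]
    simp only [pvBStep, List.nil_append]
    simp
  · rw [pvBuf_no_colon pre [] h, pvAStepC_no_colon d pre h]
    simp [pvBStep]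

theorem pvBStep_non_comma (d : PySem.Dict String String) (b : List Char × List Char × Bool)
    (c : Char) (hc : c ≠ ',') : pvBStep (d, b) c = (d, pvBufStep b c) := by
  rcases b with ⟨kb, vb, sc⟩
  simp only [pvBStep, pvBufStep, if_neg hc]
  split_ifs <;> rfl

-- the main invariant: B's char fold over cs ++ [','] computes A's fold over the segments
theorem pvMain (cs : List Char) : ∀ (pre : List Char) (d : PySem.Dict String String),
    (cs ++ [',']).foldl pvBStep (d, pre.foldl pvBufStep ([], [], false)) =
      ((pvSp1 pre cs).foldl pvAStepC d, [], [], false) := by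
  induction cs with
  | nil =>
      intro pre d
      rw [List.nil_append, List.foldl_cons, List.foldl_nil, pvFlush_eq_stepA]
      simp [pvSp1]
  | cons c rest ih =>
      intro pre d
      rw [List.cons_append, List.foldl_cons]
      by_cases hc : c = ','
      · subst hc
        rw [pvFlush_eq_stepA]
        have h0 : (PySem.Dict.empty (κ := String) (ν := String), ([] : List Char), ([] : List Char), false)
            = (PySem.Dict.empty (κ := String) (ν := String), ([] : List Char).foldl pvBufStep ([], [], false)) := by simp
        have := ih [] (pvAStepC d pre)
        rw [show (pvAStepC d pre, ([] : List Char), ([] : List Char), false)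
              = (pvAStepC d pre, ([] : List Char).foldl pvBufStep ([], [], false)) by simp]
        rw [this]
        simp [pvSp1]
      · rw [pvBStep_non_comma d _ c hc]
        rw [show pvBufStep (pre.foldl pvBufStep ([], [], false)) c
              = (pre ++ [c]).foldl pvBufStep ([], [], false) by rw [List.foldl_append]; rfl]
        rw [ih (pre ++ [c]) d]
        simp [pvSp1, hc]

-- ===== VERDICT (by name: the statement is the Claim_ definition above) =====
theorem parse_plan_summary_text_py_spec : Claim_equal_parse_plan_summary_text_py := by
  intro value _
  unfold Spec_parse_plan_summary_text_py
  unfold parse_plan_summary_text_py parse_plan_summary_text_py_alt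
  match value with
  | none => rfl
  | some s =>
      simp only
      have hsegs : (PySem.Str.split? s ",").getD [] = (pvSp1 [] s.toList).map String.ofList := by
        unfold PySem.Str.split? PySem.Chars.split?
        rw [if_neg (by decide)]
        simp only [Option.map_some, Option.getD_some]
        rw [show (",".toList) = [','] from rfl, pvSplitOn_char]
      rw [hsegs, List.foldl_map]
      have hstep : (fun (x : PySem.Dict String String) y => pvAStep x (String.ofList y)) = pvAStepC := rfl
      rw [hstep]
      have hB := pvMain s.toList [] PySem.Dict.empty
      simp only [List.foldl_nil] at hB
      rw [hB]
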